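-- pv_equiv track=rewrite | github.com/Rahul-pro1/DSA_Lab | Tree Traversal/app.py | generate_preorder_traversal_steps
-- ===== SOURCE A (Python) =====
-- tree_size = 15
--
-- def generate_preorder_traversal_steps(tree_structure):
--     steps, descriptions, highlighted, traversal_result, traversal_path = [], [], [], [], []
--
--     if 0 not in tree_structure or tree_structure[0] == "":
--         steps.append(tree_structure.copy())
--         descriptions.append("Root node is empty. Please provide a value for the root (Node 0).")
--         highlighted.append([])
--         return steps, descriptions, highlighted, traversal_result, []
--
--     stack = [0]
--
--     while stack:
--         current = stack.pop()
--         if current >= tree_size or tree_structure.get(current, "") == "":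
--             continue
--
--         traversal_result.append(tree_structure[current])
--         steps.append(tree_structure.copy())
--         descriptions.append(f"Visit node {tree_structure[current]} (index {current})")
--         highlighted.append([current])
--         traversal_path.append(current)
--
--         right = 2 * current + 2
--         left = 2 * current + 1
--         if right < tree_size:
--             stack.append(right)
--         if left < tree_size:
--             stack.append(left)
--
--     return steps, descriptions, highlighted, traversal_result, traversal_path
-- ===== SOURCE B (Python) =====
-- tree_size = 15
--
-- def generate_preorder_traversal_steps(tree_structure):
--     if 0 not in tree_structure or tree_structure[0] == "":
--         return ([tree_structure.copy()],
--                 ["Root node is empty. Please provide a value for the root (Node 0)."],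
--                 [[]], [], [])
--
--     def order(index):
--         if index >= tree_size or tree_structure.get(index, "") == "":
--             return []
--         return [index] + order(2 * index + 1) + order(2 * index + 2)
--
--     visited = order(0)
--     steps = [tree_structure.copy() for _ in visited]
--     descriptions = [f"Visit node {tree_structure[i]} (index {i})" for i in visited]
--     highlighted = [[i] for i in visited]
--     traversal_result = [tree_structure[i] for i in visited]
--     return steps, descriptions, highlighted, traversal_result, visited
-- ===== Notes on version B (the rewrite author's own statement) =====
-- stated objective: alternative
-- what changed: Replaces the explicit-stack while-loop that appends to five accumulators in lockstep by a two-stage decomposition: a pure recursive helper first computes the preorder list of visited indices, then the five output lists are each built by an independent comprehension over that index list.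
import Mathlib
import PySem

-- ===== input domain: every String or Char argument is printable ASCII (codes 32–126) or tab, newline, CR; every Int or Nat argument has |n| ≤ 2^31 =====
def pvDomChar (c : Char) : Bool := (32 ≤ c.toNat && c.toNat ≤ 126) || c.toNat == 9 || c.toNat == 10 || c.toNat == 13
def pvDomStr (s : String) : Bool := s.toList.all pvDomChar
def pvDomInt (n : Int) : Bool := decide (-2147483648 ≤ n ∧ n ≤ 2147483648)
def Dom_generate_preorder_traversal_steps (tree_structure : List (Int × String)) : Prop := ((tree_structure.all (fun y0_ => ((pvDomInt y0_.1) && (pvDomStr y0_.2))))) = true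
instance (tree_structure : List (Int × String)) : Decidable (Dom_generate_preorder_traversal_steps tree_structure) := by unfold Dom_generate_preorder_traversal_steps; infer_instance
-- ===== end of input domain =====

-- B replaces A's explicit-stack while-loop with five lockstep accumulators by a two-stage decomposition: first compute the preorder index list, then build each output list by an independent map over it (alternative structure, same cost).


-- The five result lists (steps, descriptions, highlighted, traversal_result, traversal_path)
abbrev PvState := (List (List (Int × String))) × List String × List (List Int) × List String × List Int

-- ===== PORT A =====
-- The Python while-loop over the explicit stack (top of stack = head of list; Python appends
-- right then left, so left ends on top = at the head).  Stack indices are the Nats 0, 2i+1, 2i+2.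
-- The extra Nat argument is FUEL, a pure totality guard consumed once per iteration; the entry
-- call supplies 3^15, more than the loop can ever iterate (proved via the potential pvMu below).
def pvLoopA (d : List (Int × String)) : Nat → List Nat → PvState → PvState
  | 0, _, s => s
  | Nat.succ k, stack, s =>
    match stack with
    | [] => s
    | current :: rest =>
      if 15 ≤ current ∨ (PySem.Dict.mk d).getD (current : Int) "" = "" then
        pvLoopA d k rest s
      else
        -- the five appends of the loop body (new state s')
        let s' : PvState :=
          (s.1 ++ [d],
           s.2.1 ++ ["Visit node " ++ (PySem.Dict.mk d).getD (current : Int) "" ++ " (index " ++ PySem.Int.toStr (current : Int) ++ ")"],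
           s.2.2.1 ++ [[(current : Int)]],
           s.2.2.2.1 ++ [(PySem.Dict.mk d).getD (current : Int) ""],
           s.2.2.2.2 ++ [(current : Int)])
        if 2 * current + 2 < 15 then
          if 2 * current + 1 < 15 then
            pvLoopA d k ((2 * current + 1) :: (2 * current + 2) :: rest) s'
          else
            pvLoopA d k ((2 * current + 2) :: rest) s'
        else
          if 2 * current + 1 < 15 then
            pvLoopA d k ((2 * current + 1) :: rest) s'
          else
            pvLoopA d k rest s'

def generate_preorder_traversal_steps (tree_structure : List (Int × String)) : PvState :=
  if (PySem.Dict.mk tree_structure).contains (0 : Int) = false ∨ (PySem.Dict.mk tree_structure).getD (0 : Int) "" = "" then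
    ([tree_structure],
     ["Root node is empty. Please provide a value for the root (Node 0)."],
     [[]], [], [])
  else
    pvLoopA tree_structure (3 ^ 15) [0] ([], [], [], [], [])

-- ===== PORT B =====
-- B's pure helper order(index): the preorder list of visited indices (no accumulators).
-- The Nat fuel (totality guard) strictly exceeds the remaining depth 15 - index; entry fuel 15.
def pvOrderB (d : List (Int × String)) : Nat → Nat → List Nat
  | 0, _ => []
  | Nat.succ k, index =>
    if 15 ≤ index ∨ (PySem.Dict.mk d).getD (index : Int) "" = "" then
      []
    else
      index :: (pvOrderB d k (2 * index + 1) ++ pvOrderB d k (2 * index + 2))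

-- then each of the five outputs is a separate comprehension over the visited list
def generate_preorder_traversal_steps_alt (tree_structure : List (Int × String)) : PvState :=
  if (PySem.Dict.mk tree_structure).contains (0 : Int) = false ∨ (PySem.Dict.mk tree_structure).getD (0 : Int) "" = "" then
    ([tree_structure],
     ["Root node is empty. Please provide a value for the root (Node 0)."],
     [[]], [], [])
  else
    let visited := pvOrderB tree_structure 15 0
    (visited.map (fun _ => tree_structure),
     visited.map (fun i => "Visit node " ++ (PySem.Dict.mk tree_structure).getD (i : Int) "" ++ " (index " ++ PySem.Int.toStr (i : Int) ++ ")"),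
     visited.map (fun i => [(i : Int)]),
     visited.map (fun i => (PySem.Dict.mk tree_structure).getD (i : Int) ""),
     visited.map (fun i => (i : Int)))

-- ===== PRECONDITION & SPEC =====
def Spec_generate_preorder_traversal_steps (tree_structure : List (Int × String)) (out : (List (List (Int × String))) × List String × List (List Int) × List String × List Int) : Prop := out = generate_preorder_traversal_steps_alt tree_structure
instance (tree_structure : List (Int × String)) (out : (List (List (Int × String))) × List String × List (List Int) × List String × List Int) : Decidable (Spec_generate_preorder_traversal_steps tree_structure out) := by unfold Spec_generate_preorder_traversal_steps; infer_instance

-- ===== CLAIM (what is proved, stated in full; the proofs are below) =====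
def Claim_equal_generate_preorder_traversal_steps : Prop := ∀ (tree_structure : List (Int × String)), Dom_generate_preorder_traversal_steps tree_structure → Spec_generate_preorder_traversal_steps tree_structure (generate_preorder_traversal_steps tree_structure)

-- ===== LEMMAS AND PROOFS =====

-- emit the five appends for a whole list of visited indices (proof-only helper)
def pvEmit (d : List (Int × String)) (v : List Nat) (s : PvState) : PvState :=
  (s.1 ++ v.map (fun _ => d),
   s.2.1 ++ v.map (fun i => "Visit node " ++ (PySem.Dict.mk d).getD (i : Int) "" ++ " (index " ++ PySem.Int.toStr (i : Int) ++ ")"),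
   s.2.2.1 ++ v.map (fun i => [(i : Int)]),
   s.2.2.2.1 ++ v.map (fun i => (PySem.Dict.mk d).getD (i : Int) ""),
   s.2.2.2.2 ++ v.map (fun i => (i : Int)))

theorem pvEmit_nil (d : List (Int × String)) (s : PvState) : pvEmit d [] s = s := by
  simp [pvEmit]

theorem pvEmit_append (d : List (Int × String)) (v1 v2 : List Nat) (s : PvState) :
    pvEmit d (v1 ++ v2) s = pvEmit d v2 (pvEmit d v1 s) := by
  simp [pvEmit]

theorem pvEmit_cons (d : List (Int × String)) (i : Nat) (v : List Nat) (s : PvState) :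
    pvEmit d (i :: v) s =
      pvEmit d v
        (s.1 ++ [d],
         s.2.1 ++ ["Visit node " ++ (PySem.Dict.mk d).getD (i : Int) "" ++ " (index " ++ PySem.Int.toStr (i : Int) ++ ")"],
         s.2.2.1 ++ [[(i : Int)]],
         s.2.2.2.1 ++ [(PySem.Dict.mk d).getD (i : Int) ""],
         s.2.2.2.2 ++ [(i : Int)]) := by
  simp [pvEmit]

-- potential of a stack: the loop runs strictly fewer than pvMu stack iterations
def pvMu (stack : List Nat) : Nat := (stack.map fun i => 3 ^ (15 - i)).sum

theorem pvMu_nil : pvMu [] = 0 := rfl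

theorem pvMu_cons (i : Nat) (rest : List Nat) : pvMu (i :: rest) = 3 ^ (15 - i) + pvMu rest := by
  simp [pvMu]

theorem pvPow_pos (i : Nat) : 0 < 3 ^ (15 - i) := pow_pos (by norm_num) _

-- children of an in-range index cost at most a third of the parent
theorem pvPow_child (i : Nat) (hi : i < 15) (c : Nat) (hc : c = 2 * i + 1 ∨ c = 2 * i + 2) :
    3 ^ (15 - c) ≤ 3 ^ (14 - i) := by
  refine Nat.pow_le_pow_right (by norm_num) ?_
  omega

theorem pvPow_split (i : Nat) (hi : i < 15) : 3 ^ (15 - i) = 3 ^ (14 - i) * 3 := by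
  rw [← pow_succ]; congr 1; omega

-- the loop ignores fuel as long as there is enough of it
theorem pvLoopA_nil (d : List (Int × String)) (k : Nat) (s : PvState) : pvLoopA d k [] s = s := by
  cases k <;> rfl

theorem pvLoopA_fuel (d : List (Int × String)) :
    ∀ (k1 k2 : Nat) (stack : List Nat) (s : PvState), pvMu stack ≤ k1 → pvMu stack ≤ k2 →
      pvLoopA d k1 stack s = pvLoopA d k2 stack s := by
  intro k1
  induction k1 with
  | zero =>
    intro k2 stack s h1 _
    cases stack with
    | nil => rw [pvLoopA_nil, pvLoopA_nil]
    | cons i rest => exfalso; have := pvPow_pos i; rw [pvMu_cons] at h1; omega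
  | succ k1 ih =>
    intro k2 stack s h1 h2
    cases stack with
    | nil => rw [pvLoopA_nil, pvLoopA_nil]
    | cons i rest =>
      have hpos := pvPow_pos i
      rw [pvMu_cons] at h1 h2
      cases k2 with
      | zero => exfalso; omega
      | succ k2 =>
        rw [pvLoopA, pvLoopA]
        split_ifs with hg h2c h1c h1c
        · exact ih k2 rest s (by omega) (by omega)
        · have hi : i < 15 := by omega
          refine ih k2 _ _ ?_ ?_ <;>
          · rw [pvMu_cons, pvMu_cons]
            have b1 := pvPow_child i hi _ (Or.inl rfl)
            have b2 := pvPow_child i hi _ (Or.inr rfl)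
            have b3 := pvPow_split i hi
            omega
        · have hi : i < 15 := by omega
          refine ih k2 _ _ ?_ ?_ <;>
          · rw [pvMu_cons]
            have b2 := pvPow_child i hi _ (Or.inr rfl)
            have b3 := pvPow_split i hi
            have b4 : 0 < 3 ^ (14 - i) := pow_pos (by norm_num) _
            omega
        · have hi : i < 15 := by omega
          refine ih k2 _ _ ?_ ?_ <;>
          · rw [pvMu_cons]
            have b1 := pvPow_child i hi _ (Or.inl rfl)
            have b3 := pvPow_split i hi
            have b4 : 0 < 3 ^ (14 - i) := pow_pos (by norm_num) _
            omega
        · exact ih k2 rest _ (by omega) (by omega)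

-- a skipped index contributes the empty visited list, whatever the fuel
theorem pvOrderB_skip (d : List (Int × String)) (k i : Nat)
    (h : 15 ≤ i ∨ (PySem.Dict.mk d).getD (i : Int) "" = "") : pvOrderB d k i = [] := by
  cases k with
  | zero => rfl
  | succ k => rw [pvOrderB]; simp [h]

-- order ignores fuel as long as it exceeds the remaining depth
theorem pvOrderB_fuel (d : List (Int × String)) :
    ∀ (k1 k2 i : Nat), 15 - i ≤ k1 → 15 - i ≤ k2 → pvOrderB d k1 i = pvOrderB d k2 i := by
  intro k1
  induction k1 with
  | zero =>
    intro k2 i h1 _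
    have hi : 15 ≤ i := by omega
    rw [pvOrderB_skip d 0 i (Or.inl hi), pvOrderB_skip d k2 i (Or.inl hi)]
  | succ k1 ih =>
    intro k2 i h1 h2
    by_cases hg : 15 ≤ i ∨ (PySem.Dict.mk d).getD (i : Int) "" = ""
    · rw [pvOrderB_skip d _ i hg, pvOrderB_skip d k2 i hg]
    · have hi : i < 15 := by
        rcases Nat.lt_or_ge i 15 with h | h
        · exact h
        · exact absurd (Or.inl h) hg
      cases k2 with
      | zero => omega
      | succ k2 =>
        rw [pvOrderB, pvOrderB]
        simp only [if_neg hg]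
        rw [ih k2 (2 * i + 1) (by omega) (by omega), ih k2 (2 * i + 2) (by omega) (by omega)]

-- popping one stack element = emitting B's visited list for it, then the rest of the stack
theorem pvLoopA_cons (d : List (Int × String)) :
    ∀ (n i : Nat) (rest : List Nat) (s : PvState) (k : Nat), 15 - i ≤ n → pvMu (i :: rest) ≤ k →
      pvLoopA d k (i :: rest) s = pvLoopA d k rest (pvEmit d (pvOrderB d (15 - i) i) s) := by
  intro n
  induction n with
  | zero =>
    intro i rest s k hn hk
    have hi : 15 ≤ i := by omega
    have hpos := pvPow_pos i
    rw [pvMu_cons] at hk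
    cases k with
    | zero => exfalso; omega
    | succ k =>
      rw [pvLoopA]
      simp only [if_pos (Or.inl hi)]
      rw [pvOrderB_skip d _ i (Or.inl hi), pvEmit_nil]
      exact pvLoopA_fuel d k (k + 1) rest s (by omega) (by omega)
  | succ n ih =>
    intro i rest s k hn hk
    have hpos := pvPow_pos i
    rw [pvMu_cons] at hk
    cases k with
    | zero => exfalso; omega
    | succ k =>
      by_cases hg : 15 ≤ i ∨ (PySem.Dict.mk d).getD (i : Int) "" = ""
      · rw [pvLoopA]
        simp only [if_pos hg]
        rw [pvOrderB_skip d _ i hg, pvEmit_nil]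
        exact pvLoopA_fuel d k (k + 1) rest s (by omega) (by omega)
      · have hi : i < 15 := by
          rcases Nat.lt_or_ge i 15 with h | h
          · exact h
          · exact absurd (Or.inl h) hg
        have b1 := pvPow_child i hi _ (Or.inl rfl)
        have b2 := pvPow_child i hi _ (Or.inr rfl)
        have b3 := pvPow_split i hi
        have b4 : 0 < 3 ^ (14 - i) := pow_pos (by norm_num) _
        have h15 : 15 - i = (14 - i) + 1 := by omega
        rw [pvLoopA]
        simp only [if_neg hg]
        rw [h15, pvOrderB]
        simp only [if_neg hg]
        rw [pvEmit_cons, pvEmit_append]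
        by_cases h6 : i ≤ 6
        · have hc2 : 2 * i + 2 < 15 := by omega
          have hc1 : 2 * i + 1 < 15 := by omega
          simp only [if_pos hc2, if_pos hc1]
          rw [ih (2 * i + 1) _ _ k (by omega) (by rw [pvMu_cons, pvMu_cons]; omega)]
          rw [ih (2 * i + 2) _ _ k (by omega) (by rw [pvMu_cons]; omega)]
          rw [pvOrderB_fuel d (15 - (2 * i + 1)) (14 - i) (2 * i + 1) (by omega) (by omega)]
          rw [pvOrderB_fuel d (15 - (2 * i + 2)) (14 - i) (2 * i + 2) (by omega) (by omega)]
          exact pvLoopA_fuel d k (k + 1) rest _ (by omega) (by omega)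
        · have hc2 : ¬ 2 * i + 2 < 15 := by omega
          have hc1 : ¬ 2 * i + 1 < 15 := by omega
          simp only [if_neg hc2, if_neg hc1]
          rw [pvOrderB_skip d (14 - i) (2 * i + 1) (Or.inl (by omega))]
          rw [pvOrderB_skip d (14 - i) (2 * i + 2) (Or.inl (by omega))]
          rw [pvEmit_nil, pvEmit_nil]
          exact pvLoopA_fuel d k (k + 1) rest _ (by omega) (by omega)

-- ===== VERDICT (by name: the statement is the Claim_ definition above) =====
theorem generate_preorder_traversal_steps_spec : Claim_equal_generate_preorder_traversal_steps := by
  intro ts _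
  unfold Spec_generate_preorder_traversal_steps
  unfold generate_preorder_traversal_steps generate_preorder_traversal_steps_alt
  split_ifs with hg
  · rfl
  · rw [pvLoopA_cons ts 15 0 [] _ (3 ^ 15) (by omega) (by rw [pvMu_cons, pvMu_nil]; omega)]
    rw [pvLoopA_nil]
    simp [pvEmit]
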